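-- pv_equiv track=rewrite | github.com/AshokVivek/Products | bank-connect-quality/fsm_lambdas/library/table.py | get_final_list
-- ===== SOURCE A (Python) =====
-- def get_final_list(all_list):
--     final_list = []
--     if not all_list:
--         return final_list
--     final_list = ['']*len(all_list)
--     for i, curr_list in enumerate(all_list):
--         final_list[i] = curr_list.strip().split('$ $')[0]
--     prev_ele = ''
--     for i, item in enumerate(final_list):
--         if item not in ['', None]:
--             prev_ele = item
--         final_list[i] = prev_ele
--     return final_list
-- ===== SOURCE B (Python) =====
-- def get_final_list(all_list):
--     # Run-length block emission: instead of forward-filling element by element,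
--     # defer output: count how many positions the current fill value covers and
--     # emit the whole block at once with list repetition when the value changes.
--     out = []
--     cur = ''
--     run = 0
--     for s in all_list:
--         v = s.strip().split('$ $')[0]
--         if v:
--             out.extend([cur] * run)
--             cur = v
--             run = 1
--         else:
--             run += 1
--     out.extend([cur] * run)
--     return out
-- ===== Notes on version B (the rewrite author's own statement) =====
-- stated objective: alternative
-- what changed: Replaces A's preallocate-map-then-in-place-forward-fill (two indexed passes writing final_list[i]) with a run-length block-emission algorithm: one pass counts the run of positions covered by the current fill value and emits each block at once via list repetition ([cur]*run), flushing the final block after the loop.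
import Mathlib
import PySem

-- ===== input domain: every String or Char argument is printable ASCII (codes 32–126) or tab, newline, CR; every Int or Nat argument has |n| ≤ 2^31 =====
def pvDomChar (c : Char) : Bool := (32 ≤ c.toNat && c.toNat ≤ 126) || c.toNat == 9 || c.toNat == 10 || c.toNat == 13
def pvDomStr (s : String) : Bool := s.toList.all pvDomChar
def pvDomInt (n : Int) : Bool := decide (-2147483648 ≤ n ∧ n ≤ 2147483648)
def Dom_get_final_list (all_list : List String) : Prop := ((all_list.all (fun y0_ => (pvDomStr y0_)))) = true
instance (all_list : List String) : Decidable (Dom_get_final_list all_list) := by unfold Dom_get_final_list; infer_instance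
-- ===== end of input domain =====

-- B replaces A's preallocate+two-indexed-pass forward fill with a run-length
-- block-emission pass ([cur]*run per block); alternative decomposition, same O(n).


-- shared primitives for the str builtins BOTH Pythons call on each entry,
-- ported by hand at the character level (exact on ASCII):
-- Python str.strip(): drop leading/trailing chars with ch.isspace(); for ASCII
-- these are exactly \t \n \v \f \r, \x1c-\x1f and space.
def pvIsSpace (c : Char) : Bool :=
  (9 ≤ c.toNat && c.toNat ≤ 13) || (28 ≤ c.toNat && c.toNat ≤ 32)

def pvStrip (cs : List Char) : List Char :=
  ((cs.dropWhile pvIsSpace).reverse.dropWhile pvIsSpace).reverse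

-- Python s.split('$ $'): cut s at every (leftmost-first, non-overlapping)
-- occurrence of the separator '$ $'; always returns at least one piece (exact).
def pvSplitDollar : List Char → List (List Char)
  | [] => [[]]
  | c :: cs =>
      if c = '$' ∧ cs.take 2 = [' ', '$'] then
        [] :: pvSplitDollar (cs.drop 2)
      else
        match pvSplitDollar cs with
        | [] => [[c]]          -- unreachable: result is always non-empty
        | p :: ps => (c :: p) :: ps
termination_by cs => cs.length
decreasing_by
  all_goals simp only [List.length_drop, List.length_cons]
  all_goals omega

-- s.strip().split('$ $')[0]; the split result is never empty, so the [0]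
-- indexing never raises and the headD default is never taken (exact).
def pvItem (s : String) : String :=
  String.ofList ((pvSplitDollar (pvStrip s.toList)).headD [])

-- ===== PORT A =====
-- second loop of A: in-place forward-fill over final_list with the prev_ele
-- carry ('item not in ['', None]' ⇔ item ≠ "", since the entries are strings)
def pvA_fill (prev : String) : List String → List String
  | [] => []
  | x :: xs =>
      let p := if x ≠ "" then x else prev
      p :: pvA_fill p xs

def get_final_list (all_list : List String) : List String :=
  if all_list = [] then []
  else
    let final_list := all_list.map pvItem
    pvA_fill "" final_list

-- ===== PORT B =====
-- B's loop: state (cur, run); on a non-empty v flush the finished block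
-- [cur]*run and start a new block, otherwise grow the run; final flush at end.
def pvB_go (cur : String) (run : Nat) : List String → List String
  | [] => List.replicate run cur
  | s :: rest =>
      let v := pvItem s
      if v ≠ "" then List.replicate run cur ++ pvB_go v 1 rest
      else pvB_go cur (run + 1) rest

def get_final_list_alt (all_list : List String) : List String :=
  pvB_go "" 0 all_list

-- ===== PRECONDITION & SPEC =====
def Spec_get_final_list (all_list : List String) (out : List String) : Prop := out = get_final_list_alt all_list
instance (all_list : List String) (out : List String) : Decidable (Spec_get_final_list all_list out) := by unfold Spec_get_final_list; infer_instance

-- ===== CLAIM (what is proved, stated in full; the proofs are below) =====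
def Claim_equal_get_final_list : Prop := ∀ (all_list : List String), Dom_get_final_list all_list → Spec_get_final_list all_list (get_final_list all_list)

-- ===== LEMMAS AND PROOFS =====
theorem pvB_go_eq_fill (xs : List String) :
    ∀ (cur : String) (run : Nat),
      pvB_go cur run xs = List.replicate run cur ++ pvA_fill cur (xs.map pvItem) := by
  induction xs with
  | nil =>
      intro cur run
      rw [pvB_go, List.map_nil, pvA_fill, List.append_nil]
  | cons x xs ih =>
      intro cur run
      rw [pvB_go, List.map_cons, pvA_fill]
      by_cases h : pvItem x ≠ ""
      · rw [if_pos h, if_pos h, ih]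
        rfl
      · rw [if_neg h, if_neg h, ih, List.replicate_succ', List.append_assoc]
        rfl

-- ===== VERDICT (by name: the statement is the Claim_ definition above) =====
theorem get_final_list_spec : Claim_equal_get_final_list := by
  intro all_list _
  show get_final_list all_list = get_final_list_alt all_list
  cases all_list with
  | nil => rfl
  | cons x xs =>
      rw [get_final_list, if_neg (List.cons_ne_nil x xs)]
      rw [get_final_list_alt, pvB_go_eq_fill]
      rfl
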